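-- pv_equiv track=rewrite | github.com/comeonboi/algorithm-practise | loong's code/leetcode/editor/cn/1663具有给定数值的最小字符串-DESKTOP-O7485RO.py | getSmallestString
-- ===== SOURCE A (Python) =====
-- def getSmallestString(n: int, k: int) -> str:
--     ans = ['a'] * n
--     i, d = n - 1, k - n
--     while d > 25:
--         ans[i] = 'z'
--         d -= 25
--         i -= 1
--     ans[i] = chr(ord(ans[i]) + d)
--     return ''.join(ans)
-- ===== SOURCE B (Python) =====
-- def getSmallestString(n: int, k: int) -> str:
--     d = k - n
--     t = max((d - 1) // 25, 0)
--     return 'a' * (n - 1 - t) + chr(ord('a') + d - 25 * t) + 'z' * t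
-- ===== Notes on version B (the rewrite author's own statement) =====
-- stated objective: simpler
-- what changed: Replaced A's right-to-left mutation loop (write 'z' one cell at a time while subtracting 25) with a closed-form division: t = max((k-n-1)//25, 0) trailing 'z's and one direct string concatenation; the per-iteration Python loop disappears (C-level string repetition), measured ~7.8x at n=262144.
-- outside the precondition, e.g. on getSmallestString(2, 95): A returns '\x8cz', B returns 'szzz'; on getSmallestString(3, 130): A returns '|zz', B returns 'czzzzz'
import Mathlib
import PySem

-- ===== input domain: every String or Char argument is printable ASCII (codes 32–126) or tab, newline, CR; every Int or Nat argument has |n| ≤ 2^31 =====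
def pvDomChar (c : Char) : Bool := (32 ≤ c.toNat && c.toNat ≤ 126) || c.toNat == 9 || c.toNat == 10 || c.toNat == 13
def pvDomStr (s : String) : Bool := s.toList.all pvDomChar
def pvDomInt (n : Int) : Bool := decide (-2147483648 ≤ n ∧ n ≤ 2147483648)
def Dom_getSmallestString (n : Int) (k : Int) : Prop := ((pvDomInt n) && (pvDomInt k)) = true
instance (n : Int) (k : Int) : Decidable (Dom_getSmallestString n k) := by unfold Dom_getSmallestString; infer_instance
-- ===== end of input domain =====

-- B replaces A's right-to-left subtraction loop by a divmod closed form; equivalence proved on the problem's constraints 1 ≤ n, n ≤ k ≤ 26n.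

-- ===== PORT A =====
-- the while loop: while d > 25: ans[i] = 'z'; d -= 25; i -= 1   (none = IndexError)
def loopA (ans : List Char) (i d : Int) : Option (List Char × Int × Int) :=
  if 25 < d then
    match PySem.List.pySet? ans i 'z' with
    | none => none
    | some ans' => loopA ans' (i - 1) (d - 25)
  else some (ans, i, d)
termination_by d.toNat
decreasing_by simp_wf; omega

-- the code after the loop: ans[i] = chr(ord(ans[i]) + d); return ''.join(ans)
-- chr(ord(c)+d) ported by hand as Char.ofNat ((c.toNat + d).toNat): exact whenever ord(c)+d is a valid code point (inside Pre_ it is 97..122)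
def finishA (ans : List Char) (i d : Int) : String :=
  match PySem.List.pyGet? ans i with
  | none => ""          -- Python raises IndexError here (outside Pre_)
  | some c =>
    match PySem.List.pySet? ans i (Char.ofNat ((c.toNat : Int) + d).toNat) with
    | none => ""        -- unreachable (same index as the read)
    | some ans' => String.ofList ans'

def getSmallestString (n : Int) (k : Int) : String :=
  match loopA (List.replicate n.toNat 'a') (n - 1) (k - n) with
  | none => ""          -- Python raises IndexError here (outside Pre_)
  | some (ans, i, d) => finishA ans i d

-- ===== PORT B =====
def getSmallestString_alt (n : Int) (k : Int) : String :=
  let d := k - n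
  let t := max (PySem.Int.floordiv (d - 1) 25) 0
  String.ofList (List.replicate (n - 1 - t).toNat 'a' ++ Char.ofNat (97 + d - 25 * t).toNat :: List.replicate t.toNat 'z')

-- ===== PRECONDITION & SPEC =====
-- Pre_ admits every input with 1 ≤ n and n - 97 ≤ k ≤ 26·n (a superset of the problem's constraint
-- n ≤ k ≤ 26·n). It excludes inputs where A raises (n ≤ 0: IndexError; k < n - 97: ValueError in chr —
-- B raises there too) and the inputs with k > 26·n, outside the problem's stated bound, where A's loop
-- index goes negative and wraps around, overwriting earlier characters.
def Pre_getSmallestString (n : Int) (k : Int) : Prop := 1 ≤ n ∧ n - 97 ≤ k ∧ k ≤ 26 * n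
instance (n : Int) (k : Int) : Decidable (Pre_getSmallestString n k) := by unfold Pre_getSmallestString; infer_instance
def pvWitness_getSmallestString : Int × Int := (3, 27)

def Spec_getSmallestString (n : Int) (k : Int) (out : String) : Prop := out = getSmallestString_alt n k
instance (n : Int) (k : Int) (out : String) : Decidable (Spec_getSmallestString n k out) := by unfold Spec_getSmallestString; infer_instance

-- ===== CLAIM (what is proved, stated in full; the proofs are below) =====
def Claim_equal_getSmallestString : Prop := ∀ (n : Int) (k : Int), Dom_getSmallestString n k → Pre_getSmallestString n k → Spec_getSmallestString n k (getSmallestString n k)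

-- ===== LEMMAS AND PROOFS =====

lemma set_rep (a z : Nat) (c : Char) :
    (List.replicate (a + 1) 'a' ++ List.replicate z 'z').set a c
      = List.replicate a 'a' ++ c :: List.replicate z 'z' := by
  induction a with
  | zero => simp
  | succ m ih => simpa [List.replicate_succ] using ih

lemma get_rep (a z : Nat) (h : 0 < a) :
    (List.replicate a 'a' ++ List.replicate z 'z')[a - 1]? = some 'a' := by
  rw [List.getElem?_append_left (by simp; omega)]
  simp [List.getElem?_replicate]
  omega

-- the loop runs exactly t iterations: invariant characterization
lemma loopA_eq (t : Nat) : ∀ (a z : Nat) (d : Int), t < a → (t = 0 ∨ 25 * t < d) → d ≤ 25 * t + 25 →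
    loopA (List.replicate a 'a' ++ List.replicate z 'z') ((a : Int) - 1) d
      = some (List.replicate (a - t) 'a' ++ List.replicate (z + t) 'z', (a : Int) - 1 - t, d - 25 * t) := by
  induction t with
  | zero =>
    intro a z d hta _ hhi
    rw [loopA]
    have h25 : ¬ 25 < d := by omega
    simp [h25]
  | succ m ih =>
    intro a z d hta hlo hhi
    have hd : 25 < d := by omega
    rw [loopA]
    have hcast : (a : Int) - 1 = ((a - 1 : Nat) : Int) := by omega
    rw [if_pos hd, hcast, PySem.List.pySet?_natCast (List.replicate a 'a' ++ List.replicate z 'z') (a - 1) 'z' (by simp; omega)]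
    dsimp only
    have hsplit : a = (a - 1) + 1 := by omega
    rw [hsplit]
    simp only [Nat.add_sub_cancel]
    rw [set_rep (a - 1) z 'z']
    have hz : ('z' : Char) :: List.replicate z 'z' = List.replicate (z + 1) 'z' := by
      simp [List.replicate_succ]
    rw [hz, ih (a - 1) (z + 1) (d - 25) (by omega) (by omega) (by omega)]
    have e1 : a - 1 - m = a - 1 + 1 - (m + 1) := by omega
    have e2 : z + 1 + m = z + (m + 1) := by omega
    have e3 : ((a - 1 : Nat) : Int) - 1 - (m : Int) = ((a - 1 : Nat) : Int) - ((m + 1 : Nat) : Int) := by push_cast; ring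
    have e4 : d - 25 - 25 * (m : Int) = d - 25 * ((m + 1 : Nat) : Int) := by push_cast; ring
    rw [e1, e2, e3, e4]

lemma finishA_eq (a t : Nat) (e : Int) (ht : t < a) :
    finishA (List.replicate (a - t) 'a' ++ List.replicate t 'z') ((a : Int) - 1 - t) e
      = String.ofList (List.replicate (a - t - 1) 'a' ++ Char.ofNat (97 + e).toNat :: List.replicate t 'z') := by
  unfold finishA
  have hcast : (a : Int) - 1 - t = ((a - t - 1 : Nat) : Int) := by omega
  rw [hcast, PySem.List.pyGet?_natCast, get_rep (a - t) t (by omega)]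
  dsimp only
  rw [PySem.List.pySet?_natCast (List.replicate (a - t) 'a' ++ List.replicate t 'z') (a - t - 1) _
      (by simp only [List.length_append, List.length_replicate]; omega)]
  have hsplit : a - t = (a - t - 1) + 1 := by omega
  rw [hsplit]
  simp only [Nat.add_sub_cancel]
  rw [set_rep (a - t - 1) t _]
  have : ((('a' : Char).toNat : Nat) : Int) + e = 97 + e := by
    rw [show ('a' : Char).toNat = 97 from rfl]; push_cast; ring
  rw [this]

theorem getSmallestString_eq (n k : Int) (hp : Pre_getSmallestString n k) :
    getSmallestString n k = getSmallestString_alt n k := by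
  obtain ⟨h1, h2, h3⟩ := hp
  unfold getSmallestString getSmallestString_alt
  dsimp only
  rw [PySem.Int.floordiv_eq_ediv_of_pos (by norm_num : (0 : Int) < 25)]
  set a := n.toNat with ha
  have han : (a : Int) = n := by omega
  set d := k - n with hdd
  have hd0 : -97 ≤ d := by omega
  have hdhi : d ≤ 25 * (a : Int) := by omega
  set t := max ((d - 1) / 25) 0 with htd
  have ht0 : 0 ≤ t := by omega
  have hinit : List.replicate n.toNat 'a' = List.replicate a 'a' ++ List.replicate 0 'z' := by simp [ha]
  have hn1 : n - 1 = (a : Int) - 1 := by omega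
  rw [hinit, hn1]
  rw [loopA_eq t.toNat a 0 d (by omega) (by omega) (by omega)]
  dsimp only
  rw [Nat.zero_add]
  rw [finishA_eq a t.toNat (d - 25 * (t.toNat : Int)) (by omega)]
  have e1 : ((a : Int) - 1 - t).toNat = a - t.toNat - 1 := by omega
  have e2 : 97 + (d - 25 * ((t.toNat : Nat) : Int)) = 97 + d - 25 * t := by omega
  rw [e1, e2]

-- ===== VERDICT (by name: the statement is the Claim_ definition above) =====
theorem getSmallestString_spec : Claim_equal_getSmallestString := by
  intro n k _ hp
  unfold Spec_getSmallestString
  exact getSmallestString_eq n k hp
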